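-- pv_equiv track=rewrite | github.com/luukdvr/torcs | train_data/train_data/torcs_data_analysis_main.py | _classify_track_type
-- ===== SOURCE A (Python) =====
-- def _classify_track_type(filename):
--     """Classify track type based on filename."""
--     filename = filename.lower()
--
--     if any(keyword in filename for keyword in ['speedway', 'oval']):
--         return 'oval'
--     elif 'corner' in filename:
--         return 'corners'
--     elif any(keyword in filename for keyword in ['alpine', 'suzuka', 'aalborg']):
--         return 'road_course'
--     elif 'sprint' in filename:
--         return 'sprint'
--     elif 'multi' in filename:
--         return 'multi_car'
--     else:
--         return 'mixed'
-- ===== SOURCE B (Python) =====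
-- KEYWORD_RANKS = [
--     ('speedway', 0), ('oval', 0),
--     ('corner', 1),
--     ('alpine', 2), ('suzuka', 2), ('aalborg', 2),
--     ('sprint', 3), ('multi', 4),
-- ]
-- LABELS = ['oval', 'corners', 'road_course', 'sprint', 'multi_car']
--
-- def _classify_track_type(filename):
--     """Classify track type: single left-to-right scan over character positions,
--     keeping the best (lowest) priority rank of any keyword starting there."""
--     f = filename.lower()
--     best = 5
--     for i in range(len(f)):
--         for kw, rank in KEYWORD_RANKS:
--             if rank < best and f.startswith(kw, i):
--                 best = rank
--     return LABELS[best] if best < 5 else 'mixed'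
-- ===== Notes on version B (the rewrite author's own statement) =====
-- stated objective: alternative
-- what changed: Instead of running an if-elif chain of substring searches per keyword, B makes one left-to-right scan over the positions of the lowered filename, tests at each position which keywords start there, keeps the minimum priority rank as an accumulator, and finally maps the rank to its label.
import Mathlib
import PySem

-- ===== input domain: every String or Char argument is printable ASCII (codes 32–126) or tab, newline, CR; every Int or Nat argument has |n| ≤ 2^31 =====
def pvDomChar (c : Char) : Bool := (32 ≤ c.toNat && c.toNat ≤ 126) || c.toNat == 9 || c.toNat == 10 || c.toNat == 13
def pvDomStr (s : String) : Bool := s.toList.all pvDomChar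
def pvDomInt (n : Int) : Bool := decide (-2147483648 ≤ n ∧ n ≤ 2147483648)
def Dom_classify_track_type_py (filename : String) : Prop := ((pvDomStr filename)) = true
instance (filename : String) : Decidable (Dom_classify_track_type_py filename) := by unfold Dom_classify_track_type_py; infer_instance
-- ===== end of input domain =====

-- B replaces A's priority-ordered chain of substring searches by a single left-to-right
-- scan over the positions of the lowered filename, keeping the minimum keyword rank
-- (alternative algorithm, same asymptotic cost).

-- ===== PORT A =====
def classify_track_type_py (filename : String) : String :=
  let f := PySem.Str.lower filename
  if ["speedway", "oval"].any (fun k => PySem.Str.isIn k f) then "oval"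
  else if PySem.Str.isIn "corner" f then "corners"
  else if ["alpine", "suzuka", "aalborg"].any (fun k => PySem.Str.isIn k f) then "road_course"
  else if PySem.Str.isIn "sprint" f then "sprint"
  else if PySem.Str.isIn "multi" f then "multi_car"
  else "mixed"

-- ===== PORT B =====
def pvRanks : List (List Char × Nat) :=
  [ ("speedway".toList, 0), ("oval".toList, 0)
  , ("corner".toList, 1)
  , ("alpine".toList, 2), ("suzuka".toList, 2), ("aalborg".toList, 2)
  , ("sprint".toList, 3), ("multi".toList, 4) ]

-- inner loop of B: at one position (= suffix s), improve the best rank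
def pvStep (s : List Char) (b : Nat) : Nat :=
  pvRanks.foldl (fun b p => if p.2 < b ∧ PySem.Chars.startswith s p.1 then p.2 else b) b

-- outer loop of B: 'for i in range(len f)' scanned as the successive suffixes of f
def pvBestFrom : List Char → Nat → Nat
  | [], best => best
  | c :: rest, best => pvBestFrom rest (pvStep (c :: rest) best)

def pvLabels : List String := ["oval", "corners", "road_course", "sprint", "multi_car"]

def classify_track_type_py_alt (filename : String) : String :=
  let best := pvBestFrom (PySem.Str.lower filename).toList 5
  if best < 5 then pvLabels.getD best "mixed" else "mixed"

-- ===== PRECONDITION & SPEC =====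
def Spec_classify_track_type_py (filename : String) (out : String) : Prop := out = classify_track_type_py_alt filename
instance (filename : String) (out : String) : Decidable (Spec_classify_track_type_py filename out) := by unfold Spec_classify_track_type_py; infer_instance

-- ===== CLAIM (what is proved, stated in full; the proofs are below) =====
def Claim_equal_classify_track_type_py : Prop := ∀ (filename : String), Dom_classify_track_type_py filename → Spec_classify_track_type_py filename (classify_track_type_py filename)

-- ===== LEMMAS AND PROOFS =====

-- minimum rank among keywords satisfying Q, 5 if none
def pvMinRank (Q : List Char → Bool) : List (List Char × Nat) → Nat
  | [] => 5
  | p :: t => if Q p.1 then min p.2 (pvMinRank Q t) else pvMinRank Q t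

theorem pvFoldl_eq_min (Q : List Char → Bool) (l : List (List Char × Nat)) (b : Nat)
    (hb : b ≤ 5) :
    l.foldl (fun b p => if p.2 < b ∧ Q p.1 then p.2 else b) b = min b (pvMinRank Q l) := by
  induction l generalizing b with
  | nil => simp [pvMinRank]; omega
  | cons p t ih =>
      simp only [List.foldl_cons, pvMinRank]
      rw [ih]
      · cases hq : Q p.1
        · simp [hq]
        · simp only [hq, and_true]; split_ifs <;> omega
      · split_ifs <;> omega

theorem pvMinRank_congr (Q Q' : List Char → Bool) (l : List (List Char × Nat))
    (h : ∀ p ∈ l, Q p.1 = Q' p.1) : pvMinRank Q l = pvMinRank Q' l := by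
  induction l with
  | nil => rfl
  | cons p t ih =>
      simp only [pvMinRank, h p (by simp)]
      rw [ih (fun q hq => h q (by simp [hq]))]

theorem pvMinRank_or (P Q : List Char → Bool) (l : List (List Char × Nat)) :
    pvMinRank (fun kw => P kw || Q kw) l = min (pvMinRank P l) (pvMinRank Q l) := by
  induction l with
  | nil => rfl
  | cons p t ih =>
      simp only [pvMinRank, ih]
      cases hp : P p.1 <;> cases hq : Q p.1 <;> simp <;> omega

theorem pvIsIn_cons (kw : List Char) (c : Char) (s : List Char) :
    PySem.Chars.isIn kw (c :: s)
      = (PySem.Chars.startswith (c :: s) kw || PySem.Chars.isIn kw s) := by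
  rcases h : PySem.Chars.isIn kw (c :: s) with _ | _
  · rw [PySem.Chars.isIn_eq_false_iff] at h
    have h1 : PySem.Chars.startswith (c :: s) kw = false := by
      rw [Bool.eq_false_iff]
      intro hs
      exact h ((PySem.Chars.startswith_iff _ _).mp hs).isInfix
    have h2 : PySem.Chars.isIn kw s = false := by
      rw [PySem.Chars.isIn_eq_false_iff]
      intro hs
      exact h (List.infix_cons_iff.mpr (Or.inr hs))
    simp [h1, h2]
  · rw [PySem.Chars.isIn_iff_infix, List.infix_cons_iff] at h
    rcases h with h | h
    · simp [(PySem.Chars.startswith_iff _ _).mpr h]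
    · simp [(PySem.Chars.isIn_iff_infix _ _).mpr h]

theorem pvBestFrom_eq (s : List Char) (b : Nat) (hb : b ≤ 5) :
    pvBestFrom s b = min b (pvMinRank (fun kw => PySem.Chars.isIn kw s) pvRanks) := by
  induction s generalizing b with
  | nil =>
      have : pvMinRank (fun kw => PySem.Chars.isIn kw ([] : List Char)) pvRanks = 5 := by decide
      simp [pvBestFrom, this]; omega
  | cons c rest ih =>
      have hstep : pvStep (c :: rest) b
          = min b (pvMinRank (fun kw => PySem.Chars.startswith (c :: rest) kw) pvRanks) :=
        pvFoldl_eq_min _ _ _ hb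
      have hstep5 : pvStep (c :: rest) b ≤ 5 := by rw [hstep]; omega
      have hcongr : pvMinRank (fun kw => PySem.Chars.isIn kw (c :: rest)) pvRanks
          = pvMinRank (fun kw => PySem.Chars.startswith (c :: rest) kw
                        || PySem.Chars.isIn kw rest) pvRanks :=
        pvMinRank_congr _ _ _ (fun p _ => pvIsIn_cons p.1 c rest)
      have heta : (fun kw => PySem.Chars.startswith (c :: rest) kw)
          = PySem.Chars.startswith (c :: rest) := rfl
      simp only [pvBestFrom]
      rw [ih _ hstep5, hstep, hcongr, pvMinRank_or, heta]
      omega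

-- ===== VERDICT (by name: the statement is the Claim_ definition above) =====
set_option maxHeartbeats 2000000 in
theorem classify_track_type_py_spec : Claim_equal_classify_track_type_py := by
  intro filename _
  unfold Spec_classify_track_type_py classify_track_type_py classify_track_type_py_alt
  set f := PySem.Str.lower filename with hf
  rw [pvBestFrom_eq _ 5 (by omega)]
  rcases Bool.dichotomy (PySem.Chars.isIn ['s','p','e','e','d','w','a','y'] f.toList) with h1 | h1 <;>
  rcases Bool.dichotomy (PySem.Chars.isIn ['o','v','a','l'] f.toList) with h2 | h2 <;>
  rcases Bool.dichotomy (PySem.Chars.isIn ['c','o','r','n','e','r'] f.toList) with h3 | h3 <;>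
  rcases Bool.dichotomy (PySem.Chars.isIn ['a','l','p','i','n','e'] f.toList) with h4 | h4 <;>
  rcases Bool.dichotomy (PySem.Chars.isIn ['s','u','z','u','k','a'] f.toList) with h5 | h5 <;>
  rcases Bool.dichotomy (PySem.Chars.isIn ['a','a','l','b','o','r','g'] f.toList) with h6 | h6 <;>
  rcases Bool.dichotomy (PySem.Chars.isIn ['s','p','r','i','n','t'] f.toList) with h7 | h7 <;>
  rcases Bool.dichotomy (PySem.Chars.isIn ['m','u','l','t','i'] f.toList) with h8 | h8 <;>
  simp [pvRanks, pvMinRank, pvLabels, h1, h2, h3, h4, h5, h6, h7, h8]
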